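-- pv_equiv track=rewrite | github.com/JonasSchernich/IndustrialProductionPred | src/features/groups.py | groups_from_columns
-- ===== SOURCE A (Python) =====
-- from typing import Dict, Iterable, List
--
-- def groups_from_columns(
--     columns: Iterable[str],
--     split_on: str = ".",
-- ) -> Dict[str, List[str]]:
--     """
--     Leitet Gruppen automatisch aus Spaltennamen ab, die wie 'Branche.Indicator' strukturiert sind.
--     Gibt ein Dict[group_name -> [prefix]] zurück, das du in PCAByGroup/PerGroupTransformer verwenden kannst.
--     Beispiel:
--       'Auto.Orders', 'Auto.Sales', 'Chemie.Index' → {'Auto': ['Auto.'], 'Chemie': ['Chemie.']}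
--     """
--     groups = {}
--     for c in columns:
--         if split_on in c:
--             g = c.split(split_on, 1)[0]
--         else:
--             g = "ALL"
--         prefix = f"{g}{split_on}"
--         groups.setdefault(g, [])
--         if prefix not in groups[g]:
--             groups[g].append(prefix)
--     return groups
-- ===== SOURCE B (Python) =====
-- def groups_from_columns(columns, split_on="."):
--     # Recursive decomposition: take the first column's group, emit its entry,
--     # and recurse on the remaining columns with that whole group filtered out,
--     # so deduplication happens by shrinking the input rather than by membership
--     # tests against an accumulator.
--     def key(c):
--         return c.split(split_on, 1)[0] if split_on in c else "ALL"
--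
--     def build(cols):
--         if not cols:
--             return {}
--         g = key(cols[0])
--         return {g: [g + split_on], **build([c for c in cols[1:] if key(c) != g])}
--
--     return build(list(columns))
-- ===== Notes on version B (the rewrite author's own statement) =====
-- stated objective: alternative
-- what changed: B replaces A's incremental setdefault-plus-membership loop over a growing dict by structural recursion on the column list: emit the head column's group entry, then recurse on the tail with every column of that group filtered out, so dedup happens by shrinking the input instead of checking an accumulator.
import Mathlib
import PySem

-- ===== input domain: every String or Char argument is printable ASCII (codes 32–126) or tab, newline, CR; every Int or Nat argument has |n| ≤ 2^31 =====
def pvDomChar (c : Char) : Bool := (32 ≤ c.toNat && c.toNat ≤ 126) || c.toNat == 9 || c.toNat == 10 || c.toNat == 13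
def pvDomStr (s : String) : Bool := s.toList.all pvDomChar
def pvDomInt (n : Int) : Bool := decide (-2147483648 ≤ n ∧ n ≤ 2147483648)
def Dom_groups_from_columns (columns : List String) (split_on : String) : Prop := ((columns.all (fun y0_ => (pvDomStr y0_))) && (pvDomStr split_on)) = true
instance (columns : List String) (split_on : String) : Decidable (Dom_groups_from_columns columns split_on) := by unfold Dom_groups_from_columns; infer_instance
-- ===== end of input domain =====

-- B builds the table by structural recursion: emit the first column's group entry,
-- then recurse on the tail with that whole group filtered out, instead of A's
-- incremental setdefault/membership loop; objective: alternative decomposition.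


-- ===== PORT A =====
def groups_from_columns (columns : List String) (split_on : String) : List (String × List String) :=
  (columns.foldl (fun groups c =>
      let g : String :=
        if PySem.Str.isIn split_on c then
          ((PySem.Str.splitMax? c split_on 1).getD []).headD ""
        else "ALL"
      let prefix_ : String := g ++ split_on
      let groups := groups.setdefault g []
      if prefix_ ∈ groups.getD g [] then groups
      else groups.insert g (groups.getD g [] ++ [prefix_]))
    PySem.Dict.empty).items

-- ===== PORT B =====
-- the group name of one column (B's helper `key`)
def gfcKey (split_on c : String) : String :=
  if PySem.Str.isIn split_on c then
    ((PySem.Str.splitMax? c split_on 1).getD []).headD ""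
  else "ALL"

-- B's recursive `build`: head column's entry, then recurse on the tail with the
-- whole group filtered out (the `**rest` merge is a plain prepend since `rest`
-- cannot contain g after the filter)
def gfcBuild (split_on : String) : List String → List (String × List String)
  | [] => []
  | c :: rest =>
    let g := gfcKey split_on c
    (g, [g ++ split_on]) ::
      gfcBuild split_on (rest.filter (fun c' => gfcKey split_on c' ≠ g))
termination_by cols => cols.length
decreasing_by simpa using Nat.lt_succ_of_le (Nat.le_trans (List.length_filter_le _ _) (Nat.le_of_eq List.length_attach))

def groups_from_columns_alt (columns : List String) (split_on : String) : List (String × List String) :=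
  gfcBuild split_on columns

-- ===== PRECONDITION & SPEC =====
-- Pre_ excludes split_on = "" with a nonempty columns list: there Python's
-- c.split("", 1) raises ValueError (empty separator) in both A and B.
def Pre_groups_from_columns (columns : List String) (split_on : String) : Prop :=
  split_on ≠ "" ∨ columns = []
instance (columns : List String) (split_on : String) : Decidable (Pre_groups_from_columns columns split_on) := by unfold Pre_groups_from_columns; infer_instance
def pvWitness_groups_from_columns : List String × String := (["Auto.Orders", "Auto.Sales", "misc"], ".")

def Spec_groups_from_columns (columns : List String) (split_on : String) (out : List (String × List String)) : Prop := out = groups_from_columns_alt columns split_on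
instance (columns : List String) (split_on : String) (out : List (String × List String)) : Decidable (Spec_groups_from_columns columns split_on out) := by unfold Spec_groups_from_columns; infer_instance

-- ===== CLAIM (what is proved, stated in full; the proofs are below) =====
def Claim_equal_groups_from_columns : Prop := ∀ (columns : List String) (split_on : String), Dom_groups_from_columns columns split_on → Pre_groups_from_columns columns split_on → Spec_groups_from_columns columns split_on (groups_from_columns columns split_on)

-- ===== LEMMAS AND PROOFS =====

-- A's loop, with the per-column key map f and prefix map w abstracted: starting
-- from the dict whose items are S.map (fun g => (g, [w g])) with S nodup, the fold
-- ends with items (Set.update S (cols.map f)).map (fun g => (g, [w g])).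
theorem gfc_loop_items (f w : String → String) :
    ∀ (cols : List String) (S : List String), S.Nodup →
    (cols.foldl (fun groups c =>
        if w (f c) ∈ (groups.setdefault (f c) []).getD (f c) [] then
          groups.setdefault (f c) []
        else (groups.setdefault (f c) []).insert (f c)
          ((groups.setdefault (f c) []).getD (f c) [] ++ [w (f c)]))
      (PySem.Dict.mk (S.map (fun g => (g, [w g]))))).items
    = (PySem.Set.update S (cols.map f)).map (fun g => (g, [w g])) := by
  intro cols
  induction cols with
  | nil =>
      intro S hS
      simp [PySem.Set.update]
  | cons c cols ih =>
      intro S hS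
      have hkeys : (PySem.Dict.mk (S.map (fun g => (g, [w g])))).keys = S := by
        simp [PySem.Dict.keys, Function.comp_def]
      by_cases hg : f c ∈ S
      · -- group already present: setdefault is a no-op and the prefix is already there
        have hcont : (PySem.Dict.mk (S.map (fun g => (g, [w g])))).contains (f c) = true := by
          rw [PySem.Dict.contains_iff_mem_keys, hkeys]; exact hg
        have hitem : (f c, [w (f c)]) ∈ (PySem.Dict.mk (S.map (fun g => (g, [w g])))).items :=
          List.mem_map.mpr ⟨f c, hg, rfl⟩
        have hgetD : (PySem.Dict.mk (S.map (fun g => (g, [w g])))).getD (f c) [] = [w (f c)] :=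
          PySem.Dict.getD_of_mem_items _ hitem (by rw [hkeys]; exact hS) []
        rw [List.foldl_cons, PySem.Dict.setdefault_of_contains _ _ hcont, hgetD,
          if_pos (List.mem_singleton.mpr rfl), List.map_cons, PySem.Set.update_cons,
          PySem.Set.add_of_mem hg]
        exact ih S hS
      · -- fresh group: setdefault appends (f c, []), then the single prefix is appended
        have hcont : (PySem.Dict.mk (S.map (fun g => (g, [w g])))).contains (f c) = false := by
          rw [← Bool.not_eq_true, PySem.Dict.contains_iff_mem_keys, hkeys]
          simpa using hg
        have hstep :
            ((PySem.Dict.mk (S.map (fun g => (g, [w g])))).insert (f c) []).insert (f c)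
              ([] ++ [w (f c)])
            = PySem.Dict.mk ((S ++ [f c]).map (fun g => (g, [w g]))) := by
          apply PySem.Dict.ext
          rw [List.nil_append, PySem.Dict.insert_insert_self,
            PySem.Dict.items_insert_of_not_contains _ _ hcont]
          simp
        rw [List.foldl_cons, PySem.Dict.setdefault_of_not_contains _ _ hcont,
          PySem.Dict.getD_insert_self, if_neg (List.not_mem_nil), hstep,
          List.map_cons, PySem.Set.update_cons, PySem.Set.add_of_not_mem hg]
        have hnd : (S ++ [f c]).Nodup := by
          simp only [List.nodup_append, List.nodup_singleton, List.mem_singleton]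
          exact ⟨hS, trivial, fun a ha b hb he => hg ((he.trans hb) ▸ ha)⟩
        exact ih (S ++ [f c]) hnd

-- ofList commutes with filter
theorem ofList_filter {α : Type} [BEq α] [LawfulBEq α] (p : α → Bool) (xs : List α) :
    PySem.Set.ofList (xs.filter p) = (PySem.Set.ofList xs).filter p := by
  induction xs with
  | nil => simp [PySem.Set.ofList_nil]
  | cons x xs ih =>
      by_cases hp : p x
      · rw [List.filter_cons_of_pos hp, PySem.Set.ofList_cons, PySem.Set.ofList_cons,
          List.filter_cons_of_pos hp, ih]
        simp [PySem.Set.discard, List.filter_filter, Bool.and_comm]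
      · rw [List.filter_cons_of_neg (by simpa using hp), PySem.Set.ofList_cons, ih,
          List.filter_cons_of_neg (by simpa using hp)]
        simp only [PySem.Set.discard, List.filter_filter]
        refine (List.filter_congr fun a _ => ?_).symm
        by_cases hax : a = x
        · subst hax; simp [Bool.eq_false_iff.mpr hp]
        · simp [hax]

-- B's recursion computes the map over the first-seen-deduped key list
-- (induction on a length bound, since the recursion shrinks by filtering)
theorem gfcBuild_eq_aux (split_on : String) :
    ∀ (n : Nat) (cols : List String), cols.length ≤ n →
      gfcBuild split_on cols
        = (PySem.Set.ofList (cols.map (gfcKey split_on))).map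
            (fun g => (g, [g ++ split_on])) := by
  intro n
  induction n with
  | zero =>
      intro cols h
      rw [List.length_eq_zero_iff.mp (Nat.le_zero.mp h)]
      simp [gfcBuild]
  | succ n ih =>
      intro cols h
      match cols with
      | [] => simp [gfcBuild]
      | c :: rest =>
          have hlen : (rest.filter
              (fun c' => gfcKey split_on c' ≠ gfcKey split_on c)).length ≤ n :=
            Nat.le_trans (List.length_filter_le _ _) (Nat.le_of_succ_le_succ h)
          rw [gfcBuild, List.map_cons, PySem.Set.ofList_cons, List.map_cons, ih _ hlen]
          congr 1
          have hmf : (rest.filter (fun c' => gfcKey split_on c' ≠ gfcKey split_on c)).map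
              (gfcKey split_on)
              = (rest.map (gfcKey split_on)).filter (fun x => x ≠ gfcKey split_on c) := by
            rw [List.filter_map]; rfl
          rw [hmf, ofList_filter]
          refine congrArg _ (List.filter_congr fun a _ => ?_)
          by_cases hag : a = gfcKey split_on c <;> simp [hag]

theorem gfcBuild_eq (split_on : String) (cols : List String) :
    gfcBuild split_on cols
      = (PySem.Set.ofList (cols.map (gfcKey split_on))).map
          (fun g => (g, [g ++ split_on])) :=
  gfcBuild_eq_aux split_on cols.length cols (Nat.le_refl _)

-- ===== VERDICT (by name: the statement is the Claim_ definition above) =====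
theorem groups_from_columns_spec : Claim_equal_groups_from_columns := by
  intro columns split_on _ _
  show groups_from_columns columns split_on = groups_from_columns_alt columns split_on
  have h := gfc_loop_items
    (fun c => if PySem.Str.isIn split_on c then
        ((PySem.Str.splitMax? c split_on 1).getD []).headD "" else "ALL")
    (fun g => g ++ split_on) columns [] List.nodup_nil
  rw [groups_from_columns_alt, gfcBuild_eq]
  exact h.trans (by rw [PySem.Set.update_nil_left]; rfl)
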